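-- pv_equiv track=rewrite | github.com/cozeevoemp1-ctrl/cozeevo-pg-accountant | src/rules/merchant_rules.py | infer_source_from_upi_id
-- ===== SOURCE A (Python) =====
-- from typing import Optional
--
-- _UPI_SUFFIX_MAP = {
--     "@ybl":      "PhonePe",
--     "@ibl":      "PhonePe",
--     "@axl":      "PhonePe",
--     "@okaxis":   "Google Pay",
--     "@okicici":  "Google Pay",
--     "@oksbi":    "Google Pay",
--     "@okhdfcbank": "Google Pay",
--     "@paytm":    "Paytm",
--     "@apl":      "Amazon Pay",
--     "@rajput":   "BHIM",
--     "@upi":      "BHIM",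
-- }
--
-- def infer_source_from_upi_id(upi_id: str) -> Optional[str]:
--     """
--     Infer the payment app from UPI ID suffix.
--     Returns a TransactionSource-compatible string.
--     """
--     if not upi_id:
--         return None
--     upi_lower = upi_id.lower()
--     for suffix, app in _UPI_SUFFIX_MAP.items():
--         if upi_lower.endswith(suffix):
--             return {
--                 "PhonePe":    "upi_phonepe",
--                 "Google Pay": "upi_gpay",
--                 "Paytm":      "upi_paytm",
--                 "Amazon Pay": "upi_other",
--                 "BHIM":       "upi_bhim",
--             }.get(app, "upi_other")
--     return "upi_other"
-- ===== SOURCE B (Python) =====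
-- from typing import Optional
--
-- # suffix -> final source code, flattened from A's two-stage mapping
-- _SUFFIX_CODE = {
--     "@ybl":      "upi_phonepe",
--     "@ibl":      "upi_phonepe",
--     "@axl":      "upi_phonepe",
--     "@okaxis":   "upi_gpay",
--     "@okicici":  "upi_gpay",
--     "@oksbi":    "upi_gpay",
--     "@okhdfcbank": "upi_gpay",
--     "@paytm":    "upi_paytm",
--     "@apl":      "upi_other",
--     "@rajput":   "upi_bhim",
--     "@upi":      "upi_bhim",
-- }
--
-- def infer_source_from_upi_id(upi_id: str) -> Optional[str]:
--     if not upi_id: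
--         return None
--     _, sep, tail = upi_id.lower().rpartition('@')
--     if not sep:
--         return "upi_other"
--     return _SUFFIX_CODE.get('@' + tail, "upi_other")
-- ===== Notes on version B (the rewrite author's own statement) =====
-- stated objective: idiomatic
-- what changed: Replaced the 11-way endswith scan plus the two-stage suffix->app->code indirection with a single rpartition at the at-sign and one lookup in a flattened suffix-to-code dict.
import Mathlib
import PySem

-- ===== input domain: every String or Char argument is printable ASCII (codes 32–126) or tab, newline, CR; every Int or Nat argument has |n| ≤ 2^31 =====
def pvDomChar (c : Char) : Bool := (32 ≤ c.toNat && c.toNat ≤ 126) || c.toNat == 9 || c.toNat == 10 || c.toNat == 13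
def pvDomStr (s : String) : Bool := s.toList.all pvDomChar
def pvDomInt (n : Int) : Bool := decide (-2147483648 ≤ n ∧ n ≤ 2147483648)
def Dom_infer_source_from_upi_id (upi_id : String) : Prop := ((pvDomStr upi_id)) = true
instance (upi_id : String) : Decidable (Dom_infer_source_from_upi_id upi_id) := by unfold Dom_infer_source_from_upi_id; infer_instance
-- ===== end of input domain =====

-- B replaces A's 11-way endswith scan and two-stage app-name indirection by one
-- rpartition-at-'@' key extraction plus a single flattened suffix→code dict lookup (idiomatic).


-- ===== PORT A =====
-- _UPI_SUFFIX_MAP, iterated in insertion order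
def upiSuffixMap : List (String × String) :=
  [("@ybl", "PhonePe"), ("@ibl", "PhonePe"), ("@axl", "PhonePe"),
   ("@okaxis", "Google Pay"), ("@okicici", "Google Pay"), ("@oksbi", "Google Pay"),
   ("@okhdfcbank", "Google Pay"), ("@paytm", "Paytm"), ("@apl", "Amazon Pay"),
   ("@rajput", "BHIM"), ("@upi", "BHIM")]

-- the inner {...}.get(app, "upi_other") dict literal
def appCodeDict : PySem.Dict String String :=
  PySem.Dict.ofList [("PhonePe", "upi_phonepe"), ("Google Pay", "upi_gpay"),
                     ("Paytm", "upi_paytm"), ("Amazon Pay", "upi_other"), ("BHIM", "upi_bhim")]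

-- the `for suffix, app in _UPI_SUFFIX_MAP.items(): if upi_lower.endswith(suffix): return …` loop
def aLoop (upiLower : String) : List (String × String) → String
  | [] => "upi_other"
  | (suffix, app) :: rest =>
      if PySem.Str.endswith upiLower suffix then appCodeDict.getD app "upi_other"
      else aLoop upiLower rest

def infer_source_from_upi_id (upi_id : String) : Option String :=
  if upi_id.toList = [] then none                 -- `if not upi_id: return None`
  else some (aLoop (PySem.Str.lower upi_id) upiSuffixMap)

-- ===== PORT B =====
-- flattened suffix → final code dict
def suffixCodeDict : PySem.Dict String String :=
  PySem.Dict.ofList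
    [("@ybl", "upi_phonepe"), ("@ibl", "upi_phonepe"), ("@axl", "upi_phonepe"),
     ("@okaxis", "upi_gpay"), ("@okicici", "upi_gpay"), ("@oksbi", "upi_gpay"),
     ("@okhdfcbank", "upi_gpay"), ("@paytm", "upi_paytm"), ("@apl", "upi_other"),
     ("@rajput", "upi_bhim"), ("@upi", "upi_bhim")]

-- hand port of str.rpartition(c) (PySem has no rpartition); exact: splits at the LAST
-- occurrence of c, and returns ("", "", s) when c does not occur — as CPython does.
def pyRpartition (cs : List Char) (c : Char) : List Char × List Char × List Char :=
  if c ∈ cs then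
    let tail := (cs.reverse.takeWhile (· ≠ c)).reverse
    (cs.take (cs.length - tail.length - 1), [c], tail)
  else ([], [], cs)

def infer_source_from_upi_id_alt (upi_id : String) : Option String :=
  if upi_id.toList = [] then none                 -- `if not upi_id: return None`
  else
    let r := pyRpartition (PySem.Chars.lower upi_id.toList) '@'
    if r.2.1 = [] then some "upi_other"           -- `if not sep`
    else some (suffixCodeDict.getD (String.ofList ('@' :: r.2.2)) "upi_other")

-- ===== PRECONDITION & SPEC =====
def Spec_infer_source_from_upi_id (upi_id : String) (out : Option String) : Prop := out = infer_source_from_upi_id_alt upi_id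
instance (upi_id : String) (out : Option String) : Decidable (Spec_infer_source_from_upi_id upi_id out) := by unfold Spec_infer_source_from_upi_id; infer_instance

-- ===== CLAIM (what is proved, stated in full; the proofs are below) =====
def Claim_equal_infer_source_from_upi_id : Prop := ∀ (upi_id : String), Dom_infer_source_from_upi_id upi_id → Spec_infer_source_from_upi_id upi_id (infer_source_from_upi_id upi_id)

-- ===== LEMMAS AND PROOFS =====

-- prefix form of the key fact: for xs free of c, `xs ++ [c]` is a prefix of r
-- iff c occurs in r and the maximal c-free prefix of r is exactly xs.
theorem prefix_upto_char (c : Char) (xs r : List Char) (hxs : ∀ a ∈ xs, a ≠ c) :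
    ((xs ++ [c]) <+: r) ↔ (c ∈ r ∧ r.takeWhile (· ≠ c) = xs) := by
  induction r generalizing xs with
  | nil => simp
  | cons d r ih =>
      cases xs with
      | nil =>
          by_cases hd : d = c
          · subst hd; simp [List.cons_prefix_cons]
          · simp [List.cons_prefix_cons, hd, Ne.symm hd]
      | cons x xs =>
          have hxc : x ≠ c := hxs x (by simp)
          have hxs' : ∀ a ∈ xs, a ≠ c := fun a ha => hxs a (by simp [ha])
          by_cases hxd : d = x
          · subst hxd
            rw [show ((d :: xs) ++ [c] : List Char) = d :: (xs ++ [c]) from rfl,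
                List.cons_prefix_cons]
            simp [hxc, Ne.symm hxc, ih xs hxs']
          · by_cases hd : d = c
            · subst hd
              simp [List.cons_prefix_cons, Ne.symm hxd]
            · simp [List.cons_prefix_cons, hd, Ne.symm hxd, hxd]

-- suffix/endswith form: for suf free of '@', the lowered id ends with '@'::suf
-- iff '@' occurs and the segment after the LAST '@' is exactly suf.
theorem endswith_at_iff (l suf : List Char) (hsuf : ∀ a ∈ suf, a ≠ '@') :
    (PySem.Chars.endswith l ('@' :: suf) = true) ↔
      ('@' ∈ l ∧ (l.reverse.takeWhile (· ≠ '@')).reverse = suf) := by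
  rw [PySem.Chars.endswith_iff, ← List.reverse_prefix]
  have : ('@' :: suf).reverse = suf.reverse ++ ['@'] := by simp
  rw [this, prefix_upto_char '@' suf.reverse l.reverse (by simpa using hsuf)]
  constructor
  · rintro ⟨h1, h2⟩
    exact ⟨by simpa using h1, by rw [h2]; simp⟩
  · rintro ⟨h1, h2⟩
    refine ⟨by simpa using h1, ?_⟩
    have := congrArg List.reverse h2; simpa using this

-- dict keys '@'::suf and '@'::t differ when t ≠ suf (used to push a miss through the literal dict)
theorem key_ne (t suf : List Char) (h : t ≠ suf) :
    ((String.ofList ('@' :: suf)) == String.ofList ('@' :: t)) = false := by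
  rw [beq_eq_false_iff_ne]
  intro he
  have h2 : suf = t := by simpa using congrArg String.toList he
  exact h h2.symm

-- ===== VERDICT (by name: the statement is the Claim_ definition above) =====
theorem infer_source_from_upi_id_spec : Claim_equal_infer_source_from_upi_id := by
  intro s _
  unfold Spec_infer_source_from_upi_id infer_source_from_upi_id infer_source_from_upi_id_alt
  by_cases hnil : s.toList = []
  · simp [hnil]
  · simp only [hnil, if_false]
    set l : List Char := PySem.Chars.lower s.toList with hl
    have hlow : (PySem.Str.lower s).toList = l := by simp [hl]
    by_cases hat : '@' ∈ l
    · -- '@' occurs: both sides are determined by the segment after the last '@'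
      set t : List Char := (l.reverse.takeWhile (· ≠ '@')).reverse with ht
      have hE : ∀ suf : List Char, (∀ a ∈ suf, a ≠ '@') →
          PySem.Chars.endswith l ('@' :: suf) = decide (t = suf) := by
        intro suf hsuf
        rcases Bool.eq_false_or_eq_true (PySem.Chars.endswith l ('@' :: suf)) with hT | hF
        · rw [hT]; symm
          rw [decide_eq_true_iff]
          have := ((endswith_at_iff l suf hsuf).mp hT).2
          rw [← ht] at this; exact this
        · rw [hF]; symm
          rw [decide_eq_false_iff_not]
          intro hts
          exact (Bool.eq_false_iff.mp hF)
            ((endswith_at_iff l suf hsuf).mpr ⟨hat, by rw [← ht, hts]⟩)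
      have ht' : (List.takeWhile (fun x => !decide (x = '@')) l.reverse).reverse = t := by
        rw [ht]; simp
      have hdict : suffixCodeDict = PySem.Dict.mk
          [("@ybl", "upi_phonepe"), ("@ibl", "upi_phonepe"), ("@axl", "upi_phonepe"),
           ("@okaxis", "upi_gpay"), ("@okicici", "upi_gpay"), ("@oksbi", "upi_gpay"),
           ("@okhdfcbank", "upi_gpay"), ("@paytm", "upi_paytm"), ("@apl", "upi_other"),
           ("@rajput", "upi_bhim"), ("@upi", "upi_bhim")] := by decide
      by_cases h1 : t = ['y','b','l']
      · simp [aLoop, upiSuffixMap, pyRpartition, hat, hE, hlow]; rw [ht', h1]; decide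
      · by_cases h2 : t = ['i','b','l']
        · simp [aLoop, upiSuffixMap, pyRpartition, hat, hE, hlow]; rw [ht', h2]; decide
        · by_cases h3 : t = ['a','x','l']
          · simp [aLoop, upiSuffixMap, pyRpartition, hat, hE, hlow]; rw [ht', h3]; decide
          · by_cases h4 : t = ['o','k','a','x','i','s']
            · simp [aLoop, upiSuffixMap, pyRpartition, hat, hE, hlow]; rw [ht', h4]; decide
            · by_cases h5 : t = ['o','k','i','c','i','c','i']
              · simp [aLoop, upiSuffixMap, pyRpartition, hat, hE, hlow]; rw [ht', h5]; decide
              · by_cases h6 : t = ['o','k','s','b','i']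
                · simp [aLoop, upiSuffixMap, pyRpartition, hat, hE, hlow]; rw [ht', h6]; decide
                · by_cases h7 : t = ['o','k','h','d','f','c','b','a','n','k']
                  · simp [aLoop, upiSuffixMap, pyRpartition, hat, hE, hlow]; rw [ht', h7]; decide
                  · by_cases h8 : t = ['p','a','y','t','m']
                    · simp [aLoop, upiSuffixMap, pyRpartition, hat, hE, hlow]; rw [ht', h8]; decide
                    · by_cases h9 : t = ['a','p','l']
                      · simp [aLoop, upiSuffixMap, pyRpartition, hat, hE, hlow]; rw [ht', h9]; decide
                      · by_cases h10 : t = ['r','a','j','p','u','t']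
                        · simp [aLoop, upiSuffixMap, pyRpartition, hat, hE, hlow]; rw [ht', h10]; decide
                        · by_cases h11 : t = ['u','p','i']
                          · simp [aLoop, upiSuffixMap, pyRpartition, hat, hE, hlow]; rw [ht', h11]; decide
                          · -- no suffix matches: A falls through the loop, B misses the dict
                            have n1 : (("@ybl" : String) == String.ofList ('@'::t)) = false := key_ne t _ h1
                            have n2 : (("@ibl" : String) == String.ofList ('@'::t)) = false := key_ne t _ h2
                            have n3 : (("@axl" : String) == String.ofList ('@'::t)) = false := key_ne t _ h3
                            have n4 : (("@okaxis" : String) == String.ofList ('@'::t)) = false := key_ne t _ h4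
                            have n5 : (("@okicici" : String) == String.ofList ('@'::t)) = false := key_ne t _ h5
                            have n6 : (("@oksbi" : String) == String.ofList ('@'::t)) = false := key_ne t _ h6
                            have n7 : (("@okhdfcbank" : String) == String.ofList ('@'::t)) = false := key_ne t _ h7
                            have n8 : (("@paytm" : String) == String.ofList ('@'::t)) = false := key_ne t _ h8
                            have n9 : (("@apl" : String) == String.ofList ('@'::t)) = false := key_ne t _ h9
                            have n10 : (("@rajput" : String) == String.ofList ('@'::t)) = false := key_ne t _ h10
                            have n11 : (("@upi" : String) == String.ofList ('@'::t)) = false := key_ne t _ h11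
                            simp [aLoop, upiSuffixMap, pyRpartition, hat, hE, hlow,
                                  h1, h2, h3, h4, h5, h6, h7, h8, h9, h10, h11]
                            rw [ht']
                            simp [hdict, PySem.Dict.getD, PySem.Dict.get?,
                                  n1, n2, n3, n4, n5, n6, n7, n8, n9, n10, n11]
    · -- no '@': every endswith is false and B's sep is empty
      have hF : ∀ suf : List Char, PySem.Chars.endswith l ('@' :: suf) = false := by
        intro suf
        rw [Bool.eq_false_iff]
        intro hT
        exact hat (((PySem.Chars.endswith_iff _ _).mp hT).subset (by simp))
      simp [aLoop, upiSuffixMap, pyRpartition, hat, hF, hlow]
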